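-- pv_equiv track=rewrite | github.com/nikk0007/python-automation-for-devops | 01_puzzles-and-concepts/first-non-repeated-char.py | find_first_non_repeated_char
-- ===== SOURCE A (Python) =====
-- def find_first_non_repeated_char(s):
--     char_count = {}
--     # Count the occurrences of each character in the string
--     for char in s:
--         char_count[char] = char_count.get(char, 0) + 1
--
--     # Find the first non-repeated character
--     for char in s:
--         if char_count[char] == 1:
--             return char
--
--     # Return None if no non-repeated character found
--     return None
-- ===== SOURCE B (Python) =====
-- def find_first_non_repeated_char(s):
--     # Single streaming pass, no frequency table and no rescans:
--     # maintain the ordered queue of characters seen exactly once so far,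
--     # and the set of characters seen more than once; answer is the queue head.
--     repeated = set()
--     once = []  # chars seen exactly once so far, in first-occurrence order
--     for ch in s:
--         if ch in repeated:
--             continue
--         if ch in once:
--             once.remove(ch)
--             repeated.add(ch)
--         else:
--             once.append(ch)
--     return once[0] if once else None
-- ===== Notes on version B (the rewrite author's own statement) =====
-- stated objective: alternative
-- what changed: Replaced count-then-rescan (build a frequency dict over all of s, then scan s again for the first count-1 char) with a single streaming pass that maintains an ordered queue of characters seen exactly once and a set of repeated characters, returning the queue head.
import Mathlib
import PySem

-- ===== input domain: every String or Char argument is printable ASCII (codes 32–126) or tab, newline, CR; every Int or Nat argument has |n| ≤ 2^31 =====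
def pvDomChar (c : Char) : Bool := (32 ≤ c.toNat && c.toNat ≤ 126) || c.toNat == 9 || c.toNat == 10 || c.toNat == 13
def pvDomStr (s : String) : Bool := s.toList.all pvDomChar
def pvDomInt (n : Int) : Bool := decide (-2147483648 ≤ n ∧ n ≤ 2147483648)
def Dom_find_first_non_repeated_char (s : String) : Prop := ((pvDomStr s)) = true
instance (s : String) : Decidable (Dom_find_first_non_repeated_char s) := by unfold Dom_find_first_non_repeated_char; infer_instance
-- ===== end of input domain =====

-- B replaces A's count-then-rescan (frequency dict + second scan of s) by one streaming pass
-- keeping an ordered queue of chars seen exactly once and a set of repeated chars (alternative decomposition).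


-- ===== PORT A =====
-- char_count[char] in the second loop: every char of s is a key of char_count, so the
-- KeyError branch is unreachable and getD 0 is exact.
def find_first_non_repeated_char (s : String) : Option String :=
  let char_count : PySem.Dict Char Int :=
    s.toList.foldl (fun d c => d.insert c (d.getD c 0 + 1)) PySem.Dict.empty
  (s.toList.find? (fun c => char_count.getD c 0 == 1)).map (fun c => String.singleton c)

-- ===== PORT B =====
-- one fold over s: state = (repeated : set of chars seen ≥ 2 times, once : queue of chars seen exactly once).
-- once.remove(ch) is guarded by 'ch in once', so remove? is always some; getD is exact there.
def find_first_non_repeated_char_alt (s : String) : Option String :=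
  let st : PySem.Set Char × List Char :=
    s.toList.foldl
      (fun st ch =>
        if st.1.contains ch then st
        else if st.2.contains ch then
          (PySem.Set.add st.1 ch, (PySem.List.remove? st.2 ch).getD st.2)
        else (st.1, st.2 ++ [ch]))
      (PySem.Set.empty, [])
  (st.2.head?).map (fun c => String.singleton c)

-- ===== PRECONDITION & SPEC =====
def Spec_find_first_non_repeated_char (s : String) (out : Option String) : Prop := out = find_first_non_repeated_char_alt s
instance (s : String) (out : Option String) : Decidable (Spec_find_first_non_repeated_char s out) := by unfold Spec_find_first_non_repeated_char; infer_instance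

-- ===== CLAIM (what is proved, stated in full; the proofs are below) =====
def Claim_equal_find_first_non_repeated_char : Prop := ∀ (s : String), Dom_find_first_non_repeated_char s → Spec_find_first_non_repeated_char s (find_first_non_repeated_char s)

-- ===== LEMMAS AND PROOFS =====

-- A's dict predicate is the plain character count over s.toList.
theorem dict_pred_eq (s : String) (c : Char) :
    ((s.toList.foldl (fun d c => d.insert c (d.getD c 0 + 1)) (PySem.Dict.empty : PySem.Dict Char Int)).getD c 0 == (1 : Int))
      = decide (s.toList.count c = 1) := by
  rw [PySem.Dict.getD_foldl_insert_add_one]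
  simp only [PySem.Dict.getD_empty]
  by_cases h : s.toList.count c = 1
  · simp [h]
  · have h2 : (0 : Int) + (s.toList.count c : Int) ≠ 1 := by
      intro hc; apply h; omega
    simp [h]

theorem find?_eq_head?_filter (l : List Char) (p : Char → Bool) :
    l.find? p = (l.filter p).head? := by
  induction l with
  | nil => rfl
  | cons x xs ih =>
    by_cases h : p x = true
    · rw [List.find?_cons_of_pos h, List.filter_cons_of_pos h, List.head?_cons]
    · rw [List.find?_cons_of_neg h, List.filter_cons_of_neg h, ih]

-- removing the unique occurrence of a as a filter
theorem filter_pred'_eq_erase (p : List Char) (pr pr' : Char → Bool) (a : Char)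
    (h : ∀ c, c ≠ a → pr' c = pr c) (ha' : pr' a = false) (hcnt : p.count a ≤ 1) :
    p.filter pr' = (p.filter pr).erase a := by
  induction p with
  | nil => rfl
  | cons x xs ih =>
    by_cases hx : x = a
    · subst hx
      have h0 : xs.count x = 0 := by
        have hh : (x :: xs).count x = xs.count x + 1 := by simp
        omega
      have hnot : x ∉ xs := List.count_eq_zero.mp h0
      have hfx : xs.filter pr' = xs.filter pr := by
        apply List.filter_congr
        intro c hc
        exact h c (fun hca => hnot (hca ▸ hc))
      by_cases hpa : pr x = true
      · rw [List.filter_cons_of_neg (by simp [ha']), List.filter_cons_of_pos hpa, hfx, List.erase_cons_head]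
      · have hnf : x ∉ xs.filter pr := fun hm => hnot (List.mem_of_mem_filter hm)
        rw [List.filter_cons_of_neg (by simp [ha']), List.filter_cons_of_neg hpa, hfx,
          List.erase_of_not_mem hnf]
    · have hcnt' : xs.count a ≤ 1 := by
        simp only [List.count_cons, beq_iff_eq, hx, if_false] at hcnt
        omega
      have hpr : pr' x = pr x := h x hx
      by_cases hpx : pr x = true
      · have he : (x :: xs.filter pr).erase a = x :: (xs.filter pr).erase a := by
          rw [List.erase_cons]
          simp [hx]
        rw [List.filter_cons_of_pos (hpr.trans hpx), List.filter_cons_of_pos hpx, he, ih hcnt']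
      · rw [List.filter_cons_of_neg (by rw [hpr]; exact hpx),
          List.filter_cons_of_neg hpx, ih hcnt']

theorem set_add_contains (s : PySem.Set Char) (x c : Char) :
    (PySem.Set.add s x).contains c = (s.contains c || decide (c = x)) := by
  unfold PySem.Set.add
  split
  · next hh => by_cases hc : c = x <;> simp_all [PySem.Set.contains]
  · simp [PySem.Set.contains]

-- loop invariant for B's fold: after processing prefix p, the queue is exactly the
-- count-1 characters of p (each appears once, in first-occurrence order) and the set
-- holds exactly the characters with count ≥ 2.
theorem loop_inv (l : List Char) : ∀ (p : List Char) (rep : PySem.Set Char),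
    (∀ c, rep.contains c = decide (2 ≤ p.count c)) →
    (l.foldl
      (fun (st : PySem.Set Char × List Char) ch =>
        if st.1.contains ch then st
        else if st.2.contains ch then
          (PySem.Set.add st.1 ch, (PySem.List.remove? st.2 ch).getD st.2)
        else (st.1, st.2 ++ [ch]))
      (rep, p.filter (fun c => decide (p.count c = 1)))).2
      = (p ++ l).filter (fun c => decide ((p ++ l).count c = 1)) := by
  induction l with
  | nil => intro p rep _; simp
  | cons a t ih =>
    intro p rep hrep
    rw [List.foldl_cons]
    have key : ∀ c, (p ++ [a]).count c = if c = a then p.count c + 1 else p.count c := by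
      intro c
      rw [List.count_append]
      by_cases hc : c = a
      · subst hc
        rw [if_pos rfl]
        simp
      · rw [if_neg hc]
        have h0 : List.count c [a] = 0 := List.count_eq_zero.mpr (by simp [hc])
        omega
    have hkey_a : (p ++ [a]).count a = p.count a + 1 := by rw [key a, if_pos rfl]
    by_cases hra : rep.contains a = true
    · -- a already repeated: state unchanged
      have hca : 2 ≤ p.count a := by
        have h' := (hrep a).symm.trans hra
        exact of_decide_eq_true h'
      rw [if_pos hra]
      have h1 : List.filter (fun c => decide ((p ++ [a]).count c = 1)) [a] = [] := by
        simp [List.count_append]; omega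
      have hfe : p.filter (fun c => decide (p.count c = 1))
          = (p ++ [a]).filter (fun c => decide ((p ++ [a]).count c = 1)) := by
        rw [List.filter_append, h1, List.append_nil]
        apply List.filter_congr
        intro c _
        by_cases hc : c = a
        · subst hc
          rw [hkey_a]
          exact decide_eq_decide.mpr (by omega)
        · rw [key c, if_neg hc]
      have hrep' : ∀ c, rep.contains c = decide (2 ≤ (p ++ [a]).count c) := by
        intro c
        rw [hrep c, key c]
        by_cases hc : c = a
        · subst hc
          rw [if_pos rfl]
          exact decide_eq_decide.mpr (by omega)
        · rw [if_neg hc]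
      have hstep := ih (p ++ [a]) rep hrep'
      rw [hfe]
      simpa using hstep
    · have hle : p.count a ≤ 1 := by
        have h' := hrep a
        rw [Bool.not_eq_true] at hra
        rw [hra] at h'
        have := of_decide_eq_false h'.symm
        omega
      by_cases hma : (p.filter (fun c => decide (p.count c = 1))).contains a = true
      · -- a seen exactly once before: move it from the queue to the repeated set
        have hmem : a ∈ p.filter (fun c => decide (p.count c = 1)) := by simpa using hma
        have hc1 : p.count a = 1 := by simpa using (List.of_mem_filter hmem)
        rw [if_neg hra, if_pos hma]
        rw [PySem.List.remove?_eq_some_erase _ a hmem, Option.getD_some]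
        have h1 : List.filter (fun c => decide ((p ++ [a]).count c = 1)) [a] = [] := by
          simp [List.count_append, hc1]
        have hagree : ∀ c, c ≠ a →
            (fun c => decide ((p ++ [a]).count c = 1)) c = (fun c => decide (p.count c = 1)) c := by
          intro c hc
          simp only [key c, if_neg hc]
        have hfalse : (fun c => decide ((p ++ [a]).count c = 1)) a = false := by
          simp [List.count_append, hc1]
        have hfe : (p.filter (fun c => decide (p.count c = 1))).erase a
            = (p ++ [a]).filter (fun c => decide ((p ++ [a]).count c = 1)) := by
          rw [List.filter_append, h1, List.append_nil]
          exact (filter_pred'_eq_erase p _ _ a hagree hfalse hle).symm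
        have hrep' : ∀ c, (PySem.Set.add rep a).contains c = decide (2 ≤ (p ++ [a]).count c) := by
          intro c
          rw [set_add_contains, hrep c, key c]
          by_cases hc : c = a
          · subst hc
            rw [if_pos rfl]
            simp [hc1]
          · rw [if_neg hc]
            simp [hc]
        have hstep := ih (p ++ [a]) (PySem.Set.add rep a) hrep'
        rw [hfe]
        simpa using hstep
      · -- a never seen before: append it to the queue
        have hc0 : p.count a = 0 := by
          rcases Nat.eq_or_lt_of_le hle with h | h
          · exfalso
            have hin : a ∈ p := by
              have : 0 < p.count a := by omega
              exact List.count_pos_iff.mp this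
            have hmem' : a ∈ p.filter (fun c => decide (p.count c = 1)) :=
              List.mem_filter.mpr ⟨hin, by simp [h.symm]⟩
            exact hma (by simpa using hmem')
          · omega
        have hnp : a ∉ p := List.count_eq_zero.mp hc0
        rw [if_neg hra, if_neg hma]
        have h1 : List.filter (fun c => decide ((p ++ [a]).count c = 1)) [a] = [a] := by
          simp [List.count_append, hc0]
        have hfe : p.filter (fun c => decide (p.count c = 1)) ++ [a]
            = (p ++ [a]).filter (fun c => decide ((p ++ [a]).count c = 1)) := by
          rw [List.filter_append, h1]
          congr 1
          apply List.filter_congr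
          intro c hc
          have hca : c ≠ a := fun hh => hnp (hh ▸ hc)
          rw [key c, if_neg hca]
        have hrep' : ∀ c, rep.contains c = decide (2 ≤ (p ++ [a]).count c) := by
          intro c
          rw [hrep c, key c]
          by_cases hc : c = a
          · subst hc
            rw [if_pos rfl, hc0]
            rfl
          · rw [if_neg hc]
        have hstep := ih (p ++ [a]) rep hrep'
        rw [hfe]
        simpa using hstep

-- ===== VERDICT (by name: the statement is the Claim_ definition above) =====
theorem find_first_non_repeated_char_spec : Claim_equal_find_first_non_repeated_char := by
  intro s _
  unfold Spec_find_first_non_repeated_char find_first_non_repeated_char find_first_non_repeated_char_alt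
  simp only
  have hA : (s.toList.find? fun c =>
      (s.toList.foldl (fun d c => d.insert c (d.getD c 0 + 1)) (PySem.Dict.empty : PySem.Dict Char Int)).getD c 0 == (1 : Int))
      = (s.toList.filter (fun c => decide (s.toList.count c = 1))).head? := by
    have hfn : (fun c =>
        (s.toList.foldl (fun d c => d.insert c (d.getD c 0 + 1)) (PySem.Dict.empty : PySem.Dict Char Int)).getD c 0 == (1 : Int))
        = (fun c => decide (s.toList.count c = 1)) := funext (dict_pred_eq s)
    rw [hfn, find?_eq_head?_filter]
  have hB := loop_inv s.toList [] PySem.Set.empty (by intro c; simp [PySem.Set.empty, PySem.Set.contains])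
  simp only [List.filter_nil, List.nil_append] at hB
  rw [hA, hB]
  rfl
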